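-- pv_equiv track=rewrite | github.com/gzhu725/Everybody-Codes-2025 | Day9/part3.py | is_child
-- ===== SOURCE A (Python) =====
-- def is_child(child, p1, p2):
--     """Return (is_valid_child, matches_with_p1, matches_with_p2)"""
--     m1 = m2 = 0
--     for a, b, c in zip(p1, p2, child):
--         # Child must match *one* parent at each position
--         if c != a and c != b:
--             return (False, 0, 0)
--         if c == a:
--             m1 += 1
--         if c == b:
--             m2 += 1
--     return (True, m1, m2)
-- ===== SOURCE B (Python) =====
-- def is_child(child, p1, p2):
--     """Return (is_valid_child, matches_with_p1, matches_with_p2)"""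
--     triples = list(zip(p1, p2, child))
--     n = len(triples)
--     m1 = sum(a == c for a, b, c in triples)
--     m2 = sum(b == c for a, b, c in triples)
--     both = sum(a == c and b == c for a, b, c in triples)
--     # inclusion-exclusion: every position matches some parent iff m1 + m2 - both == n
--     return (True, m1, m2) if m1 + m2 - both == n else (False, 0, 0)
-- ===== Notes on version B (the rewrite author's own statement) =====
-- stated objective: alternative
-- what changed: Validity is no longer tested per position: B counts m1, m2 and the positions matching both parents, and deduces validity by inclusion-exclusion (m1 + m2 - both == number of positions), with no early exit and no per-position or-test.
import Mathlib
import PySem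

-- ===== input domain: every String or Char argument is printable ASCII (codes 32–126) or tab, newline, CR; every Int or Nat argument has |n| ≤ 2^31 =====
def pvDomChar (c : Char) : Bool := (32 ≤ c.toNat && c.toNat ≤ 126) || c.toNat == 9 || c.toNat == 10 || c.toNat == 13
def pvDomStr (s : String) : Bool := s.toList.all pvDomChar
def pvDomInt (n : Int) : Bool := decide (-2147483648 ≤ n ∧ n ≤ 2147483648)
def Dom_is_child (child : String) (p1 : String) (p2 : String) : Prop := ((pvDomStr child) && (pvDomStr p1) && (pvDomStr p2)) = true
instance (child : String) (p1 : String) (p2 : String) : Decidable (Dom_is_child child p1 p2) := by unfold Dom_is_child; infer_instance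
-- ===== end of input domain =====

-- B derives validity by inclusion-exclusion over three counts (m1 + m2 - both == n) instead of
-- A's fused per-position validity test with early return (objective: alternative characterization).

-- ===== PORT A =====
-- the zip(p1, p2, child) loop with early return, carrying m1 m2
def isChildLoopA : List Char → List Char → List Char → Int → Int → Bool × Int × Int
  | a :: as, b :: bs, c :: cs, m1, m2 =>
    if c ≠ a ∧ c ≠ b then (false, 0, 0)
    else isChildLoopA as bs cs (if c = a then m1 + 1 else m1) (if c = b then m2 + 1 else m2)
  | _, _, _, m1, m2 => (true, m1, m2)

def is_child (child : String) (p1 : String) (p2 : String) : Bool × Int × Int :=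
  isChildLoopA p1.toList p2.toList child.toList 0 0

-- ===== PORT B =====
-- list(zip(p1, p2, child)) as a list of triples
def isChildZip3 : List Char → List Char → List Char → List (Char × Char × Char)
  | a :: as, b :: bs, c :: cs => (a, b, c) :: isChildZip3 as bs cs
  | _, _, _ => []

def is_child_alt (child : String) (p1 : String) (p2 : String) : Bool × Int × Int :=
  let ts := isChildZip3 p1.toList p2.toList child.toList
  let n : Int := ts.length
  let m1 : Int := ts.countP (fun t => t.1 == t.2.2)
  let m2 : Int := ts.countP (fun t => t.2.1 == t.2.2)
  let both : Int := ts.countP (fun t => t.1 == t.2.2 && t.2.1 == t.2.2)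
  if m1 + m2 - both == n then (true, m1, m2) else (false, 0, 0)

-- ===== PRECONDITION & SPEC =====
def Spec_is_child (child : String) (p1 : String) (p2 : String) (out : Bool × Int × Int) : Prop := out = is_child_alt child p1 p2
instance (child : String) (p1 : String) (p2 : String) (out : Bool × Int × Int) : Decidable (Spec_is_child child p1 p2 out) := by unfold Spec_is_child; infer_instance

-- ===== CLAIM (what is proved, stated in full; the proofs are below) =====
def Claim_equal_is_child : Prop := ∀ (child : String) (p1 : String) (p2 : String), Dom_is_child child p1 p2 → Spec_is_child child p1 p2 (is_child child p1 p2)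

-- ===== LEMMAS AND PROOFS =====

-- each position contributes at most 1 to m1 + m2 - both
theorem isChildCount_bound (ts : List (Char × Char × Char)) :
    ts.countP (fun t => t.1 == t.2.2) + ts.countP (fun t => t.2.1 == t.2.2)
      ≤ ts.length + ts.countP (fun t => t.1 == t.2.2 && t.2.1 == t.2.2) := by
  induction ts with
  | nil => simp
  | cons t ts ih =>
    obtain ⟨a, b, c⟩ := t
    simp only [List.countP_cons, List.length_cons]
    by_cases h1 : a = c <;> by_cases h2 : b = c <;> simp [h1, h2] <;> omega

-- loop invariant: A's loop equals B's inclusion-exclusion shape with the accumulators added on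
set_option maxHeartbeats 1000000 in
theorem isChildLoopA_eq (as bs cs : List Char) (m1 m2 : Int) :
    isChildLoopA as bs cs m1 m2 =
      (let ts := isChildZip3 as bs cs
       if ((ts.countP (fun t => t.1 == t.2.2) : Int) + ts.countP (fun t => t.2.1 == t.2.2)
            - ts.countP (fun t => t.1 == t.2.2 && t.2.1 == t.2.2) == (ts.length : Int))
       then (true, m1 + (ts.countP (fun t => t.1 == t.2.2) : Int),
                   m2 + (ts.countP (fun t => t.2.1 == t.2.2) : Int))
       else (false, 0, 0)) := by
  induction as generalizing bs cs m1 m2 with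
  | nil => cases bs <;> cases cs <;> simp [isChildLoopA, isChildZip3]
  | cons a as ih =>
    cases bs with
    | nil => cases cs <;> simp [isChildLoopA, isChildZip3]
    | cons b bs =>
      cases cs with
      | nil => simp [isChildLoopA, isChildZip3]
      | cons c cs =>
        have hb := isChildCount_bound (isChildZip3 as bs cs)
        simp only [isChildLoopA, isChildZip3, List.countP_cons, List.length_cons]
        rw [ih]
        by_cases h1 : c = a <;> by_cases h2 : c = b
        · subst h1; subst h2
          simp only [beq_self_eq_true, Bool.and_self, ne_eq, not_true_eq_false, false_and,
            if_false, if_true]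
          split_ifs <;> (try simp only [beq_iff_eq, Prod.mk.injEq, true_and] at *) <;>
            first
              | trivial
              | omega
              | exact ⟨by push_cast; omega, by push_cast; omega⟩
        · subst h1
          have hb' : (b == c) = false := beq_eq_false_iff_ne.mpr (fun h => h2 h.symm)
          simp only [beq_self_eq_true, hb', Bool.true_and, ne_eq, not_true_eq_false, false_and,
            if_false, if_true, if_neg h2, Nat.add_zero]
          split_ifs <;> (try simp only [beq_iff_eq, Prod.mk.injEq, true_and] at *) <;>
            first
              | trivial
              | omega
              | exact ⟨by push_cast; omega, by push_cast; omega⟩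
        · subst h2
          have ha' : (a == c) = false := beq_eq_false_iff_ne.mpr (fun h => h1 h.symm)
          simp only [beq_self_eq_true, ha', Bool.false_and, ne_eq, not_true_eq_false, and_false,
            if_false, if_true, if_neg h1, Nat.add_zero]
          split_ifs <;> (try simp only [beq_iff_eq, Prod.mk.injEq, true_and] at *) <;>
            first
              | trivial
              | omega
              | exact ⟨by push_cast; omega, by push_cast; omega⟩
        · have ha' : (a == c) = false := beq_eq_false_iff_ne.mpr (fun h => h1 h.symm)
          have hb' : (b == c) = false := beq_eq_false_iff_ne.mpr (fun h => h2 h.symm)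
          rw [if_pos (⟨h1, h2⟩ : c ≠ a ∧ c ≠ b)]
          simp only [ha', hb', Bool.false_and, if_false, Nat.add_zero]
          split_ifs <;> (try simp only [beq_iff_eq, Prod.mk.injEq, true_and] at *) <;>
            first
              | trivial
              | omega
              | exact ⟨by push_cast; omega, by push_cast; omega⟩

-- ===== VERDICT (by name: the statement is the Claim_ definition above) =====
theorem is_child_spec : Claim_equal_is_child := by
  intro child p1 p2 _
  unfold Spec_is_child is_child is_child_alt
  rw [isChildLoopA_eq]
  simp
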